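-- pv_equiv track=rewrite | github.com/ericblue/mac-agent-gateway | scripts/verify_skill.py | extract_base_frontmatter
-- ===== SOURCE A (Python) =====
-- def extract_base_frontmatter(frontmatter: str) -> str:
--     """Remove integrity and signature blocks from frontmatter.
--
--     This gives us the canonical content that was signed.
--     """
--     lines = frontmatter.split("\n")
--     result = []
--     skip_block = False
--
--     for line in lines:
--         # Check if we're starting an integrity or signature block
--         if line.startswith("integrity:") or line.startswith("signature:"):
--             skip_block = True
--             continue
--
--         # Check if we're exiting a block (line doesn't start with space)
--         if skip_block and line and not line[0].isspace():
--             skip_block = False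
--
--         if not skip_block:
--             result.append(line)
--
--     # Remove trailing empty lines
--     while result and not result[-1].strip():
--         result.pop()
--
--     return "\n".join(result)
-- ===== SOURCE B (Python) =====
-- def extract_base_frontmatter(frontmatter: str) -> str:
--     """Remove integrity and signature blocks from frontmatter.
--
--     Group-then-filter: split the lines into top-level blocks, drop the
--     integrity/signature blocks, concatenate, trim trailing blank lines.
--     """
--     # Phase 1: group lines into top-level blocks (a block starts at a
--     # non-empty line whose first character is not whitespace; indented or
--     # empty lines belong to the current block).
--     blocks = []
--     current = []
--     for line in frontmatter.split("\n"):
--         if line and not line[0].isspace():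
--             blocks.append(current)
--             current = [line]
--         else:
--             current.append(line)
--     blocks.append(current)
--
--     # Phase 2: keep only blocks not headed by integrity:/signature:.
--     kept = [b for b in blocks
--             if not b or not (b[0].startswith("integrity:")
--                              or b[0].startswith("signature:"))]
--
--     # Phase 3: concatenate and trim trailing blank lines.
--     out = [line for b in kept for line in b]
--     while out and not out[-1].strip():
--         out.pop()
--     return "\n".join(out)
-- ===== Notes on version B (the rewrite author's own statement) =====
-- stated objective: alternative
-- what changed: A's single pass with a mutable skip_block flag is replaced by a group-then-filter decomposition: lines are first grouped into top-level YAML blocks, blocks headed by integrity:/signature: are filtered out, and the survivors are concatenated before trimming trailing blank lines.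
import Mathlib
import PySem

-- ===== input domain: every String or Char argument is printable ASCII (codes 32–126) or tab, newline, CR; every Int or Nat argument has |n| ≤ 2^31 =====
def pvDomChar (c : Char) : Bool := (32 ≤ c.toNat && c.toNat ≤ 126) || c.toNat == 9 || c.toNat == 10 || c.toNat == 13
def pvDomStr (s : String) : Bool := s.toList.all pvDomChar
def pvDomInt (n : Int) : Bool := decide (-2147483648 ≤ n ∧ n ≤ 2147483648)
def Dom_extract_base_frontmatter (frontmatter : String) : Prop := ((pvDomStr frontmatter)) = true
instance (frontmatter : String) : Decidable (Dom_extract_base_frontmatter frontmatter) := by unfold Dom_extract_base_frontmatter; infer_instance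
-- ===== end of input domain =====

-- B replaces A's one-pass skip-flag loop with a group-into-blocks / filter-blocks /
-- concatenate decomposition (objective: alternative; same cost).

-- ===== PORT A =====
-- 'line and not line[0].isspace()' (Python truthiness of the line, then its first char;
-- line[0] is only read when the line is non-empty, as in the short-circuit)
def pvATruthyNonSpace : List Char → Bool
  | [] => false
  | c :: _ => !(PySem.Chars.isspace c)

-- the 'for line in lines' loop of A: state = (result, skip_block)
def pvALoop : List (List Char) → List (List Char) → Bool → List (List Char)
  | [], result, _ => result
  | line :: rest, result, skip =>
    if PySem.Chars.startswith line "integrity:".toList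
        || PySem.Chars.startswith line "signature:".toList then
      pvALoop rest result true
    else
      -- if skip_block and line and not line[0].isspace(): skip_block = False
      let skip2 := if skip && pvATruthyNonSpace line then false else skip
      pvALoop rest (if skip2 then result else result ++ [line]) skip2

-- the 'while result and not result[-1].strip(): result.pop()' loop, on the reversed list
def pvAPop : List (List Char) → List (List Char)
  | [] => []
  | l :: t => if PySem.Chars.strip l = [] then pvAPop t else l :: t

def extract_base_frontmatter (frontmatter : String) : String :=
  String.ofList (PySem.Chars.join "\n".toList
    ((pvAPop (pvALoop (PySem.Chars.splitOn frontmatter.toList "\n".toList) [] false).reverse).reverse))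

-- ===== PORT B =====
-- a line starts a new top-level block iff it is non-empty and its first char is not whitespace
def pvBIsTop : List Char → Bool
  | [] => false
  | c :: _ => !(PySem.Chars.isspace c)

-- Phase 1: group the lines into blocks (indented / empty lines join the current block)
def pvBGroup : List (List Char) → List (List Char) → List (List (List Char)) → List (List (List Char))
  | [], current, blocks => blocks ++ [current]
  | line :: rest, current, blocks =>
    if pvBIsTop line then pvBGroup rest [line] (blocks ++ [current])
    else pvBGroup rest (current ++ [line]) blocks

-- Phase 2 predicate: keep a block unless headed by integrity:/signature:
def pvBKeep : List (List Char) → Bool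
  | [] => true
  | h :: _ => !(PySem.Chars.startswith h "integrity:".toList
                || PySem.Chars.startswith h "signature:".toList)

def extract_base_frontmatter_alt (frontmatter : String) : String :=
  String.ofList (PySem.Chars.join "\n".toList
    ((((pvBGroup (PySem.Chars.splitOn frontmatter.toList "\n".toList) [] []).filter
        pvBKeep).flatten.reverse.dropWhile (fun l => PySem.Chars.strip l = [])).reverse))

-- ===== PRECONDITION & SPEC =====
def Spec_extract_base_frontmatter (frontmatter : String) (out : String) : Prop := out = extract_base_frontmatter_alt frontmatter
instance (frontmatter : String) (out : String) : Decidable (Spec_extract_base_frontmatter frontmatter out) := by unfold Spec_extract_base_frontmatter; infer_instance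

-- ===== CLAIM (what is proved, stated in full; the proofs are below) =====
def Claim_equal_extract_base_frontmatter : Prop := ∀ (frontmatter : String), Dom_extract_base_frontmatter frontmatter → Spec_extract_base_frontmatter frontmatter (extract_base_frontmatter frontmatter)

-- ===== LEMMAS AND PROOFS =====

-- common reference: the lines that survive, given the current skip state
def pvRef : List (List Char) → Bool → List (List Char)
  | [], _ => []
  | line :: rest, skip =>
    if PySem.Chars.startswith line "integrity:".toList
        || PySem.Chars.startswith line "signature:".toList then pvRef rest true
    else if pvBIsTop line then line :: pvRef rest false
    else if skip then pvRef rest skip else line :: pvRef rest skip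

theorem pvBIsTop_eq_pvATruthyNonSpace (l : List Char) : pvBIsTop l = pvATruthyNonSpace l := by
  cases l <;> rfl

theorem pvALoop_eq_ref (lines : List (List Char)) :
    ∀ result skip, pvALoop lines result skip = result ++ pvRef lines skip := by
  induction lines with
  | nil => intro r s; simp [pvALoop, pvRef]
  | cons line rest ih =>
    intro r s
    simp only [pvALoop, pvRef, pvBIsTop_eq_pvATruthyNonSpace]
    by_cases hC : (PySem.Chars.startswith line "integrity:".toList
        || PySem.Chars.startswith line "signature:".toList) = true
    · rw [if_pos hC, if_pos hC, ih]
    · rw [if_neg hC, if_neg hC]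
      cases hs : s
      · simp [ih]
      · cases htop : pvATruthyNonSpace line <;> simp [ih]

-- a continuation line is never an integrity:/signature: header
theorem pvNotTop_keep (l : List Char) (h : pvBIsTop l = false) :
    (PySem.Chars.startswith l "integrity:".toList
      || PySem.Chars.startswith l "signature:".toList) = false := by
  cases l with
  | nil => decide
  | cons c cs =>
    simp only [pvBIsTop, Bool.not_eq_false'] at h
    have h1 : PySem.Chars.startswith (c :: cs) "integrity:".toList = false := by
      by_contra hq
      rw [Bool.not_eq_false, PySem.Chars.startswith_iff] at hq
      obtain ⟨t, ht⟩ := hq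
      rw [show ("integrity:".toList) = 'i' :: "ntegrity:".toList from rfl] at ht
      simp only [List.cons_append, List.cons.injEq] at ht
      rw [← ht.1] at h
      exact absurd h (by decide)
    have h2 : PySem.Chars.startswith (c :: cs) "signature:".toList = false := by
      by_contra hq
      rw [Bool.not_eq_false, PySem.Chars.startswith_iff] at hq
      obtain ⟨t, ht⟩ := hq
      rw [show ("signature:".toList) = 's' :: "ignature:".toList from rfl] at ht
      simp only [List.cons_append, List.cons.injEq] at ht
      rw [← ht.1] at h
      exact absurd h (by decide)
    rw [h1, h2]; rfl

-- a block's fate is decided by its head; continuation lines do not change it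
theorem pvKeep_append (cur : List (List Char)) (l : List Char) (h : pvBIsTop l = false) :
    pvBKeep (cur ++ [l]) = pvBKeep cur := by
  cases cur with
  | nil =>
    obtain ⟨h1, h2⟩ := Bool.or_eq_false_iff.mp (pvNotTop_keep l h)
    simp at h1 h2
    simp [pvBKeep, h1, h2]
  | cons a t => simp [pvBKeep]

theorem pvBGroup_eq_ref (lines : List (List Char)) :
    ∀ cur blocks,
      ((pvBGroup lines cur blocks).filter pvBKeep).flatten
      = (blocks.filter pvBKeep).flatten
        ++ (if pvBKeep cur then cur else [])
        ++ pvRef lines (!pvBKeep cur) := by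
  induction lines with
  | nil =>
    intro cur blocks
    cases h : pvBKeep cur <;> simp [pvBGroup, pvRef, List.filter_append, h]
  | cons line rest ih =>
    intro cur blocks
    simp only [pvBGroup, pvRef]
    by_cases ht : pvBIsTop line = true
    · rw [if_pos ht, ih]
      have hk : pvBKeep [line]
          = !(PySem.Chars.startswith line "integrity:".toList
              || PySem.Chars.startswith line "signature:".toList) := rfl
      by_cases hC : (PySem.Chars.startswith line "integrity:".toList
          || PySem.Chars.startswith line "signature:".toList) = true
      · rw [if_pos hC]
        rw [hC] at hk
        cases h : pvBKeep cur <;>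
          simp [List.filter_append, hk, h]
      · rw [if_neg hC, if_pos ht]
        rw [Bool.eq_false_iff.mpr hC] at hk
        cases h : pvBKeep cur <;>
          simp [List.filter_append, hk, h]
    · have ht' : pvBIsTop line = false := Bool.eq_false_iff.mpr ht
      obtain ⟨h1, h2⟩ := Bool.or_eq_false_iff.mp (pvNotTop_keep line ht')
      simp at h1 h2
      rw [if_neg ht, ih, pvKeep_append cur line ht']
      cases h : pvBKeep cur
      · simp [h1, h2, ht']
      · simp [h1, h2]

theorem pvAPop_eq_dropWhile (xs : List (List Char)) :
    pvAPop xs = xs.dropWhile (fun l => PySem.Chars.strip l = []) := by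
  induction xs with
  | nil => rfl
  | cons l t ih =>
    by_cases h : PySem.Chars.strip l = []
    · simp [pvAPop, List.dropWhile, h, ih]
    · simp [pvAPop, List.dropWhile, h]

-- ===== VERDICT (by name: the statement is the Claim_ definition above) =====
theorem extract_base_frontmatter_spec : Claim_equal_extract_base_frontmatter := by
  intro frontmatter _
  unfold Spec_extract_base_frontmatter extract_base_frontmatter extract_base_frontmatter_alt
  rw [pvALoop_eq_ref, pvBGroup_eq_ref, pvAPop_eq_dropWhile]
  simp [pvBKeep]
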